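-- pv_equiv track=rewrite | github.com/MANYAJAIN195/SecureEnc | resources/rsa.py | get_multiplicative_inverse
-- ===== SOURCE A (Python) =====
-- def gcd_of_two_numbers(a, b) :
--         a, b = abs(a), abs(b)
--         if a < b :
--             a, b = b, a
--
--         remainder = gcd = b
--         while (remainder != 0) :
--             gcd = remainder
--             remainder = a % b
--             a = b
--             b = remainder
--         return gcd
--
-- def get_multiplicative_inverse(a, m) :
--         gcd = gcd_of_two_numbers(a, m)
--         if gcd != 1 :
--             return -1
--         else :
--             i = 0
--             ans = 0
--             while ans != 1 :
--                 i += 1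
--                 ans = (a * i) % m
--             return i
-- ===== SOURCE B (Python) =====
-- def get_multiplicative_inverse(a, m):
--     # extended Euclidean algorithm: O(log m) instead of A's linear scan
--     old_r, r = a, m
--     old_s, s = 1, 0
--     while r != 0:
--         q = old_r // r
--         old_r, r = r, old_r - q * r
--         old_s, s = s, old_s - q * s
--     if old_r != 1 and old_r != -1:
--         return -1
--     return (old_s * old_r) % m
-- ===== Notes on version B (the rewrite author's own statement) =====
-- stated objective: faster
-- what changed: Replaced A's linear scan over all candidate inverses i=1,2,... with the extended Euclidean algorithm, normalizing the Bezout coefficient into [0,m).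
-- outside the precondition, e.g. on get_multiplicative_inverse(0, 1): A returns -1, B returns 0; on get_multiplicative_inverse(0, -1): A returns -1, B returns 0; on get_multiplicative_inverse(1, 0): A returns -1, B raises ZeroDivisionError
import Mathlib
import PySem

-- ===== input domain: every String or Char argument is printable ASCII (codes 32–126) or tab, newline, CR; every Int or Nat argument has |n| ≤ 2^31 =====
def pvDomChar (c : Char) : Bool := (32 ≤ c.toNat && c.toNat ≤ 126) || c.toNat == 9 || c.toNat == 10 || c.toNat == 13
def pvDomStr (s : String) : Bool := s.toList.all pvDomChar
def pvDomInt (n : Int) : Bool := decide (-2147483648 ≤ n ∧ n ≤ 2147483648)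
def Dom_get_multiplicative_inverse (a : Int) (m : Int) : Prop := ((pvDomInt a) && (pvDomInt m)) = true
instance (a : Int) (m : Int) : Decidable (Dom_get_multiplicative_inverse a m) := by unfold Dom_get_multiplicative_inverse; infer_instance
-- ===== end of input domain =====

-- B replaces A's O(m) linear scan for the inverse by the extended Euclidean algorithm.


-- termination helper cited by both loop ports below
theorem pv_mod_natAbs_lt (a b : Int) (hb : b ≠ 0) :
    (PySem.Int.mod a b).natAbs < b.natAbs := by
  rcases lt_or_gt_of_ne hb with h | h
  · have h1 := (PySem.Int.mod_neg_bounds a h).1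
    have h2 := (PySem.Int.mod_neg_bounds a h).2
    omega
  · have h1 := PySem.Int.mod_nonneg a h
    have h2 := PySem.Int.mod_lt a h
    omega

-- ===== PORT A =====
-- Python's `while remainder != 0` loop: at every check `remainder` equals the current `b`.
def gcdLoopA (a b g : Int) : Int :=
  if _h : b = 0 then g
  else gcdLoopA b (PySem.Int.mod a b) b
termination_by b.natAbs
decreasing_by exact pv_mod_natAbs_lt a b _h

def gcd_of_two_numbers (a b : Int) : Int :=
  let a1 := |a|
  let b1 := |b|
  let p := if a1 < b1 then (b1, a1) else (a1, b1)
  gcdLoopA p.1 p.2 p.2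

-- Python's unbounded `while ans != 1` search loop, given fuel; inside Pre_ the
-- inverse is found before the fuel m.natAbs + 1 runs out (proved below).
def searchLoopA (a m : Int) (fuel : Nat) (i ans : Int) : Int :=
  if ans = 1 then i
  else match fuel with
    | 0 => i
    | n + 1 => searchLoopA a m n (i + 1) (PySem.Int.mod (a * (i + 1)) m)

def get_multiplicative_inverse (a : Int) (m : Int) : Int :=
  let g := gcd_of_two_numbers a m
  if g ≠ 1 then -1
  else searchLoopA a m (m.natAbs + 1) 0 0

-- ===== PORT B =====
def egcdLoop (oldr r olds s : Int) : Int × Int :=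
  if _h : r = 0 then (oldr, olds)
  else
    let q := PySem.Int.floordiv oldr r
    egcdLoop r (oldr - q * r) s (olds - q * s)
termination_by r.natAbs
decreasing_by
  have heq : oldr - PySem.Int.floordiv oldr r * r = PySem.Int.mod oldr r := by
    have := PySem.Int.floordiv_mul_add_mod oldr r
    omega
  rw [heq]; exact pv_mod_natAbs_lt oldr r _h

def get_multiplicative_inverse_alt (a : Int) (m : Int) : Int :=
  let p := egcdLoop a m 1 0
  if p.1 ≠ 1 ∧ p.1 ≠ -1 then -1
  else PySem.Int.mod (p.2 * p.1) m

-- ===== PRECONDITION & SPEC =====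
-- Pre_ excludes m ≤ 1 with gcd(a,m) = 1: there A's search loop never finds
-- (a*i) % m == 1 and diverges — except at the four points (0,±1), (±1,0), where
-- A's helper gcd accidentally returns 0 (its loop never runs) so A returns -1;
-- that corner value is an artefact of A's buggy gcd, excluded along with it.
def Pre_get_multiplicative_inverse (a : Int) (m : Int) : Prop := 1 < m ∨ Int.gcd a m ≠ 1
instance (a : Int) (m : Int) : Decidable (Pre_get_multiplicative_inverse a m) := by
  unfold Pre_get_multiplicative_inverse; infer_instance

def pvWitness_get_multiplicative_inverse : Int × Int := (3, 7)

def Spec_get_multiplicative_inverse (a : Int) (m : Int) (out : Int) : Prop := out = get_multiplicative_inverse_alt a m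
instance (a : Int) (m : Int) (out : Int) : Decidable (Spec_get_multiplicative_inverse a m out) := by unfold Spec_get_multiplicative_inverse; infer_instance

-- ===== CLAIM (what is proved, stated in full; the proofs are below) =====
def Claim_equal_get_multiplicative_inverse : Prop := ∀ (a : Int) (m : Int), Dom_get_multiplicative_inverse a m → Pre_get_multiplicative_inverse a m → Spec_get_multiplicative_inverse a m (get_multiplicative_inverse a m)

-- ===== LEMMAS AND PROOFS =====

-- A's gcd loop computes Nat.gcd once the second argument is nonzero
theorem gcdLoopA_nat : ∀ (y x : Nat) (g : Int), y ≠ 0 →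
    gcdLoopA (x : Int) (y : Int) g = (Nat.gcd x y : Int) := by
  intro y
  induction y using Nat.strong_induction_on with
  | _ y ih =>
    intro x g hy
    rw [gcdLoopA]
    have hyz : ((y : Int) = 0) = False := by simp [hy]
    simp only [hyz, dite_false]
    rw [PySem.Int.mod_natCast]
    by_cases hxy : x % y = 0
    · rw [hxy, gcdLoopA]
      simp only [Nat.cast_zero, dite_true]
      have : Nat.gcd x y = y := by
        rw [Nat.gcd_comm, Nat.gcd_rec, hxy, Nat.gcd_zero_left]
      rw [this]
    · rw [ih (x % y) (Nat.mod_lt x (Nat.pos_of_ne_zero hy)) y _ hxy]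
      have : Nat.gcd y (x % y) = Nat.gcd x y := by
        rw [Nat.gcd_comm y (x % y), ← Nat.gcd_rec, Nat.gcd_comm]
      rw [this]

-- A's gcd helper: 0 when either argument is 0 (its loop never runs), else the real gcd
theorem gcdLoopA_zero (x g : Int) : gcdLoopA x 0 g = g := by
  rw [gcdLoopA]; simp

theorem gcd_of_two_eq (a m : Int) :
    gcd_of_two_numbers a m = if a = 0 ∨ m = 0 then 0 else (Int.gcd a m : Int) := by
  have hGD : gcd_of_two_numbers a m =
      gcdLoopA (if |a| < |m| then ((|m|), (|a|)) else ((|a|), (|m|))).1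
        (if |a| < |m| then ((|m|), (|a|)) else ((|a|), (|m|))).2
        (if |a| < |m| then ((|m|), (|a|)) else ((|a|), (|m|))).2 := rfl
  rw [hGD]
  by_cases hlt : |a| < |m|
  · rw [if_pos hlt]
    show gcdLoopA (|m|) (|a|) (|a|) = _
    by_cases ha : a = 0
    · subst ha
      simp [gcdLoopA_zero]
    · have hm : m ≠ 0 := by
        intro h; subst h; simp at hlt
        have := abs_nonneg a; omega
      rw [if_neg (by push_neg; exact ⟨ha, hm⟩)]
      rw [Int.abs_eq_natAbs a, Int.abs_eq_natAbs m,
        gcdLoopA_nat a.natAbs m.natAbs _ (by simpa using ha)]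
      rw [Int.gcd_def, Nat.gcd_comm]
  · rw [if_neg hlt]
    show gcdLoopA (|a|) (|m|) (|m|) = _
    by_cases hm : m = 0
    · subst hm
      simp [gcdLoopA_zero]
    · have ha : a ≠ 0 := by
        intro h; subst h
        have : |m| > 0 := abs_pos.mpr hm
        simp at hlt
        omega
      rw [if_neg (by push_neg; exact ⟨ha, hm⟩)]
      rw [Int.abs_eq_natAbs a, Int.abs_eq_natAbs m,
        gcdLoopA_nat m.natAbs a.natAbs _ (by simpa using hm)]
      rw [Int.gcd_def]

-- ext-Euclid invariant: the Bézout coefficient tracks the remainder mod m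
theorem egcdLoop_lin (a m : Int) : ∀ (oldr r olds s : Int),
    olds * a ≡ oldr [ZMOD m] → s * a ≡ r [ZMOD m] →
    (egcdLoop oldr r olds s).2 * a ≡ (egcdLoop oldr r olds s).1 [ZMOD m] := by
  intro oldr r olds s
  induction oldr, r, olds, s using egcdLoop.induct with
  | case1 oldr olds s =>
    intro h1 h2
    rw [egcdLoop]
    simpa using h1
  | case2 oldr r olds s h q ih =>
    intro h1 h2
    rw [egcdLoop]
    simp only [h, dite_false]
    refine ih h2 ?_
    have heq : (olds - q * s) * a = olds * a - q * (s * a) := by ring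
    rw [heq]
    exact h1.sub (h2.mul_left _)

-- ext-Euclid computes the gcd (up to sign)
theorem egcdLoop_gcd : ∀ (oldr r olds s : Int),
    ((egcdLoop oldr r olds s).1).natAbs = Int.gcd oldr r := by
  intro oldr r olds s
  induction oldr, r, olds, s using egcdLoop.induct with
  | case1 oldr olds s =>
    rw [egcdLoop]
    simp [Int.gcd_zero_right]
  | case2 oldr r olds s h q ih =>
    rw [egcdLoop]
    simp only [h, dite_false]
    rw [ih]
    have heq : oldr - q * r = oldr + (-q) * r := by ring
    rw [heq, Int.gcd_add_mul_right_right, Int.gcd_comm]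

-- A's search loop returns the unique inverse j once it is characterized
theorem searchLoopA_eq (a m j : Int)
    (hinv : PySem.Int.mod (a * j) m = 1)
    (hmin : ∀ k : Int, 1 ≤ k → k < j → PySem.Int.mod (a * k) m ≠ 1) :
    ∀ (fuel : Nat) (i ans : Int), 0 ≤ i → i < j → j ≤ i + (fuel : Int) → ans ≠ 1 →
      searchLoopA a m fuel i ans = j := by
  intro fuel
  induction fuel with
  | zero =>
    intro i ans hi0 hij hfi hans
    simp only [Nat.cast_zero, add_zero] at hfi
    omega
  | succ n ih =>
    intro i ans hi0 hij hfi hans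
    rw [searchLoopA.eq_def]
    simp only [hans, if_false]
    by_cases hj : i + 1 = j
    · rw [hj, hinv, searchLoopA.eq_def]
      simp
    · have hlt : i + 1 < j := by omega
      have hfi' : j ≤ i + 1 + (n : Int) := by omega
      exact ih (i + 1) _ (by omega) hlt hfi' (hmin (i + 1) (by omega) hlt)

theorem main_eq (a m : Int) (hpre : Pre_get_multiplicative_inverse a m) :
    get_multiplicative_inverse a m = get_multiplicative_inverse_alt a m := by
  unfold get_multiplicative_inverse get_multiplicative_inverse_alt
  by_cases hg : Int.gcd a m = 1
  · -- gcd = 1, so Pre_ forces 1 < m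
    have hm : 1 < m := by
      rcases hpre with h | h
      · exact h
      · exact absurd hg h
    have hm0 : (0 : Int) < m := by omega
    have ha0 : a ≠ 0 := by
      intro h
      subst h
      rw [Int.gcd_zero_left] at hg
      omega
    -- A's side: its gcd helper returns 1, then the search loop runs
    have hA : gcd_of_two_numbers a m = 1 := by
      rw [gcd_of_two_eq]
      have : ¬ (a = 0 ∨ m = 0) := by push_neg; exact ⟨ha0, by omega⟩
      simp [this, hg]
    -- B's side: egcdLoop returns R = ±1 and the Bézout coefficient S
    set R := (egcdLoop a m 1 0).1 with hR
    set S := (egcdLoop a m 1 0).2 with hS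
    have hRabs : R.natAbs = 1 := by rw [hR, egcdLoop_gcd, hg]
    have hR1 : R = 1 ∨ R = -1 := by omega
    have hBcond : ¬ (R ≠ 1 ∧ R ≠ -1) := by
      rcases hR1 with h | h <;> simp [h]
    have hSR : S * a ≡ R [ZMOD m] := by
      apply egcdLoop_lin
      · simp [Int.ModEq]
      · show 0 * a ≡ m [ZMOD m]
        simp [Int.ModEq, Int.emod_self]
    -- the value B returns
    set j := PySem.Int.mod (S * R) m with hj
    have hjE : j = (S * R) % m := by rw [hj, PySem.Int.mod_eq_emod_of_pos hm0]
    have hj0 : 0 ≤ j := by rw [hj]; exact PySem.Int.mod_nonneg _ hm0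
    have hjm : j < m := by rw [hj]; exact PySem.Int.mod_lt _ hm0
    -- a * j ≡ 1 (mod m)
    have haj : a * j ≡ 1 [ZMOD m] := by
      have h1 : j ≡ S * R [ZMOD m] := by
        rw [hjE]; exact Int.emod_emod_of_dvd _ dvd_rfl
      have h2 : a * j ≡ a * (S * R) [ZMOD m] := h1.mul_left a
      have h3 : a * (S * R) = (S * a) * R := by ring
      have h4 : (S * a) * R ≡ R * R [ZMOD m] := hSR.mul_right R
      have h5 : R * R = 1 := by rcases hR1 with h | h <;> rw [h] <;> ring
      calc a * j ≡ a * (S * R) [ZMOD m] := h2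
        _ = (S * a) * R := h3
        _ ≡ R * R [ZMOD m] := h4
        _ = 1 := h5
    have hone : (1 : Int) % m = 1 := Int.emod_eq_of_lt (by omega) hm
    have hinv : PySem.Int.mod (a * j) m = 1 := by
      rw [PySem.Int.mod_eq_emod_of_pos hm0]
      have := haj
      unfold Int.ModEq at this
      rw [this, hone]
    have hj1 : 1 ≤ j := by
      by_contra hc
      have hj00 : j = 0 := by omega
      rw [hj00, mul_zero, PySem.Int.mod_eq_emod_of_pos hm0] at hinv
      simp at hinv
    -- minimality: no smaller positive k satisfies (a*k) % m = 1
    have hco : IsCoprime m a := by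
      rw [Int.isCoprime_iff_gcd_eq_one, Int.gcd_comm]
      exact hg
    have hmin : ∀ k : Int, 1 ≤ k → k < j → PySem.Int.mod (a * k) m ≠ 1 := by
      intro k hk1 hkj hcontra
      rw [PySem.Int.mod_eq_emod_of_pos hm0] at hcontra
      have hak : a * k ≡ 1 [ZMOD m] := by
        unfold Int.ModEq
        rw [hcontra, hone]
      have hkequiv : a * k ≡ a * j [ZMOD m] := hak.trans haj.symm
      have hdvd : m ∣ (a * j - a * k) := hkequiv.dvd
      have hdvd2 : m ∣ (j - k) * a := by
        have : (j - k) * a = a * j - a * k := by ring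
        rw [this]; exact hdvd
      have hdvd3 : m ∣ (j - k) := hco.dvd_of_dvd_mul_right hdvd2
      have : m ≤ j - k := Int.le_of_dvd (by omega) hdvd3
      omega
    -- both sides return j
    have hAval : searchLoopA a m (m.natAbs + 1) 0 0 = j := by
      apply searchLoopA_eq a m j hinv hmin
      · omega
      · omega
      · have hmn : (m.natAbs : Int) = m := Int.natAbs_of_nonneg (by omega)
        rw [Nat.cast_add, Nat.cast_one, hmn]
        omega
      · omega
    rw [if_neg (by simp [hA]), if_neg hBcond]
    exact hAval
  · -- gcd ≠ 1: both sides return -1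
    have hA : gcd_of_two_numbers a m ≠ 1 := by
      rw [gcd_of_two_eq]
      by_cases h0 : a = 0 ∨ m = 0
      · simp [h0]
      · simp only [h0, if_neg]
        intro hc
        apply hg
        exact_mod_cast hc
    have hRabs : ((egcdLoop a m 1 0).1).natAbs = Int.gcd a m := egcdLoop_gcd a m 1 0
    have hBcond : (egcdLoop a m 1 0).1 ≠ 1 ∧ (egcdLoop a m 1 0).1 ≠ -1 := by
      constructor
      · intro h; rw [h] at hRabs; exact hg (by simpa using hRabs.symm)
      · intro h; rw [h] at hRabs; exact hg (by simpa using hRabs.symm)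
    rw [if_pos hA, if_pos hBcond]

-- ===== VERDICT (by name: the statement is the Claim_ definition above) =====
theorem get_multiplicative_inverse_spec : Claim_equal_get_multiplicative_inverse := by
  intro a m _ hpre
  exact main_eq a m hpre
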